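-- pv_equiv track=rewrite | github.com/Bracciata/AoC2021 | Day3/part2.py | count_bits_by_pos
-- ===== SOURCE A (Python) =====
-- def count_bits_by_pos(values):
--     counts = {}
--     for line in values:
--         for i in range(len(line)):
--             if i in counts:
--                 if line[i] in counts[i]:
--                     counts[i][line[i]]+=1
--                 else:
--                     counts[i][line[i]]=1
--             else:
--                 counts[i]={line[i]:1}
--     return counts
-- ===== SOURCE B (Python) =====
-- def count_bits_by_pos(values):
--     # Column-major: outer loop over positions, tallying each column in one dict.
--     max_len = max(map(len, values), default=0)
--     counts = {}
--     for i in range(max_len):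
--         col = {}
--         for line in values:
--             if i < len(line):
--                 c = line[i]
--                 col[c] = col.get(c, 0) + 1
--         counts[i] = col
--     return counts
-- ===== Notes on version B (the rewrite author's own statement) =====
-- stated objective: alternative
-- what changed: Transposed the loop nest: B iterates column-major (outer loop over positions up to the max line length, inner pass tallying one flat per-column dict with get-default), instead of A's row-major walk that hand-grows a nested dict-of-dicts per character.
import Mathlib
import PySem

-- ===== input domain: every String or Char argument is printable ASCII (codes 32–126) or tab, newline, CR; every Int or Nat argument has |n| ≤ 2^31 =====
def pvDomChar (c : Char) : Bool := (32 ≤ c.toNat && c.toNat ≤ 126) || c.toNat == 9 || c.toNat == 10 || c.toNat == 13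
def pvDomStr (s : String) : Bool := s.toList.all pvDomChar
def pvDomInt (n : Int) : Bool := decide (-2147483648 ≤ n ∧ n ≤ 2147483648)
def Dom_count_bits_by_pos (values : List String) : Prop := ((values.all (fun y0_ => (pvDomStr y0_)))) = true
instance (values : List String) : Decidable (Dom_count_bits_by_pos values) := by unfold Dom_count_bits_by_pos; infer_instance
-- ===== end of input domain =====

-- B rewrites A column-major (outer loop over positions, one flat tally dict per column) instead of A's
-- row-major nested dict-of-dicts; same return value, similar cost (objective: alternative decomposition).

-- ===== PORT A =====
-- line[i] in Python is a 1-character str; PySem.Str.pyGet? yields the Char, wrapped into a String.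
-- All ported index accesses are guarded (i in range(len(line)) resp. i < len(line)), so pyGet? is
-- always `some` and the "" default is unreachable.
def pvCharAt (line : String) (i : Int) : String :=
  ((PySem.Str.pyGet? line i).map (fun ch => String.ofList [ch])).getD ""

-- the body of A's outer loop: 'for i in range(len(line)): …'
def pvAStep (counts : PySem.Dict Int (PySem.Dict String Int)) (line : String) :
    PySem.Dict Int (PySem.Dict String Int) :=
  (PySem.List.pyRange 0 (PySem.Str.len line)).foldl (fun counts i =>
    let c : String := pvCharAt line i
    if counts.contains i then
      let inner := counts.getD i PySem.Dict.empty
      if inner.contains c then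
        counts.insert i (inner.insert c (inner.getD c 0 + 1))
      else
        counts.insert i (inner.insert c 1)
    else
      counts.insert i (PySem.Dict.mk [(c, 1)])) counts

def count_bits_by_pos (values : List String) : List (Int × List (String × Int)) :=
  (values.foldl pvAStep PySem.Dict.empty).items.map (fun p => (p.1, p.2.items))

-- ===== PORT B =====
-- B's inner loop: tally the column at position i across all lines
def pvBCol (values : List String) (i : Int) : PySem.Dict String Int :=
  values.foldl (fun col line =>
    if i < PySem.Str.len line then
      let c : String := pvCharAt line i
      col.insert c (col.getD c 0 + 1)
    else col) PySem.Dict.empty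

def count_bits_by_pos_alt (values : List String) : List (Int × List (String × Int)) :=
  let maxLen : Int := PySem.List.maxD (values.map (fun l => PySem.Str.len l)) (fun x => x) 0
  (PySem.List.pyRange 0 maxLen).map (fun i => (i, (pvBCol values i).items))

-- ===== PRECONDITION & SPEC =====
def Spec_count_bits_by_pos (values : List String) (out : List (Int × List (String × Int))) : Prop := out = count_bits_by_pos_alt values
instance (values : List String) (out : List (Int × List (String × Int))) : Decidable (Spec_count_bits_by_pos values out) := by unfold Spec_count_bits_by_pos; infer_instance

-- ===== CLAIM (what is proved, stated in full; the proofs are below) =====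
def Claim_equal_count_bits_by_pos : Prop := ∀ (values : List String), Dom_count_bits_by_pos values → Spec_count_bits_by_pos values (count_bits_by_pos values)

-- ===== LEMMAS AND PROOFS =====

-- running maximum of the line lengths of p
def pvMx (p : List String) : Nat := p.foldl (fun a l => max a l.toList.length) 0

-- the nested dict A has built after processing the lines p
def pvState (p : List String) : PySem.Dict Int (PySem.Dict String Int) :=
  PySem.Dict.mk ((List.range (pvMx p)).map (fun (i : Nat) => ((i : Int), pvBCol p (i : Int))))

-- the state in the middle of A's inner loop: positions < k already updated with `line`
def pvMid (p : List String) (line : String) (k : Nat) : PySem.Dict Int (PySem.Dict String Int) :=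
  PySem.Dict.mk ((List.range (max (pvMx p) k)).map (fun (i : Nat) =>
    ((i : Int), if i < k then pvBCol (p ++ [line]) (i : Int) else pvBCol p (i : Int))))

-- the body of A's inner loop, named
def pvG (line : String) (counts : PySem.Dict Int (PySem.Dict String Int)) (i : Int) :
    PySem.Dict Int (PySem.Dict String Int) :=
  let c : String := pvCharAt line i
  if counts.contains i then
    let inner := counts.getD i PySem.Dict.empty
    if inner.contains c then
      counts.insert i (inner.insert c (inner.getD c 0 + 1))
    else
      counts.insert i (inner.insert c 1)
  else
    counts.insert i (PySem.Dict.mk [(c, 1)])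

lemma pvMx_append (p : List String) (l : String) :
    pvMx (p ++ [l]) = max (pvMx p) l.toList.length := by
  simp [pvMx, List.foldl_append]

lemma pvBCol_append (p : List String) (line : String) (i : Int) :
    pvBCol (p ++ [line]) i =
      if i < PySem.Str.len line then
        (pvBCol p i).insert (pvCharAt line i) ((pvBCol p i).getD (pvCharAt line i) 0 + 1)
      else pvBCol p i := by
  simp [pvBCol, List.foldl_append]

lemma pvBCol_of_ge (p : List String) (k : Nat) (h : pvMx p ≤ k) :
    pvBCol p (k : Int) = PySem.Dict.empty := by
  unfold pvBCol
  rw [PySem.List.foldl_congr_mem p _ (fun acc _ => acc) _ ?_, PySem.List.foldl_ignore]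
  intro acc line hline
  have hle : line.toList.length ≤ pvMx p :=
    (PySem.List.le_foldl_max_nat p (fun l => l.toList.length) 0).2 line hline
  rw [if_neg]
  rw [PySem.Str.len_eq]
  omega

lemma pvKeys_mid (p : List String) (line : String) (k : Nat) :
    (pvMid p line k).keys = (List.range (max (pvMx p) k)).map (fun (i : Nat) => (i : Int)) := by
  simp [pvMid, PySem.Dict.keys_mk]

lemma pvNodup_mid (p : List String) (line : String) (k : Nat) :
    (pvMid p line k).keys.Nodup := by
  rw [pvKeys_mid]
  exact (List.nodup_range).map (fun a b h => by exact_mod_cast h)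

lemma pvContains_mid (p : List String) (line : String) (k j : Nat) :
    (pvMid p line k).contains (j : Int) = decide (j < max (pvMx p) k) := by
  rw [PySem.Dict.contains_eq_decide_mem_keys, pvKeys_mid]
  simp [List.mem_map, List.mem_range]

lemma pvGetD_mid (p : List String) (line : String) (k j : Nat) (hj : j < max (pvMx p) k) :
    (pvMid p line k).getD (j : Int) PySem.Dict.empty =
      if j < k then pvBCol (p ++ [line]) (j : Int) else pvBCol p (j : Int) := by
  apply PySem.Dict.getD_of_mem_items _ _ (pvNodup_mid p line k)
  simp only [pvMid]
  exact List.mem_map.2 ⟨j, List.mem_range.2 hj, rfl⟩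

-- A's branchy body equals the uniform "insert (getD + 1)" form
lemma pvG_uniform (line : String) (counts : PySem.Dict Int (PySem.Dict String Int)) (i : Int) :
    pvG line counts i =
      counts.insert i ((counts.getD i PySem.Dict.empty).insert (pvCharAt line i)
        ((counts.getD i PySem.Dict.empty).getD (pvCharAt line i) 0 + 1)) := by
  unfold pvG
  by_cases h1 : counts.contains i
  · rw [if_pos h1]
    by_cases h2 : (counts.getD i PySem.Dict.empty).contains (pvCharAt line i)
    · rw [if_pos h2]
    · rw [if_neg h2,
        PySem.Dict.getD_of_not_contains _ 0 (by simp only [Bool.not_eq_true] at h2; exact h2)]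
      norm_num
  · rw [if_neg h1,
      PySem.Dict.getD_of_not_contains _ _ (by simp only [Bool.not_eq_true] at h1; exact h1)]
    rw [PySem.Dict.getD_empty]
    have hmk : (PySem.Dict.mk [(pvCharAt line i, (1 : Int))] : PySem.Dict String Int) =
        PySem.Dict.empty.insert (pvCharAt line i) (0 + 1) := by
      apply PySem.Dict.ext
      rw [PySem.Dict.items_insert_of_not_contains _ _ (by simp [PySem.Dict.contains_empty])]
      norm_num
      rfl
    rw [hmk]

lemma pvG_mid (p : List String) (line : String) (k : Nat)
    (hk : k < line.toList.length) :
    pvG line (pvMid p line k) (k : Int) = pvMid p line (k + 1) := by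
  rw [pvG_uniform]
  have hv : pvBCol (p ++ [line]) (k : Int) =
      (pvBCol p (k : Int)).insert (pvCharAt line (k : Int))
        ((pvBCol p (k : Int)).getD (pvCharAt line (k : Int)) 0 + 1) := by
    rw [pvBCol_append, if_pos]
    rw [PySem.Str.len_eq]
    exact_mod_cast hk
  by_cases hk2 : k < pvMx p
  · have hc : (pvMid p line k).contains (k : Int) = true := by
      rw [pvContains_mid]; simp; omega
    have hg : (pvMid p line k).getD (k : Int) PySem.Dict.empty = pvBCol p (k : Int) := by
      rw [pvGetD_mid p line k k (by omega)]
      simp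
    rw [hg]
    apply PySem.Dict.ext
    rw [PySem.Dict.items_insert_of_contains _ _ hc]
    simp only [pvMid]
    have hmax : max (pvMx p) (k + 1) = max (pvMx p) k := by omega
    rw [hmax, List.map_map]
    apply List.map_congr_left
    intro i hi
    rw [List.mem_range] at hi
    by_cases hik : i = k
    · subst hik
      simp only [Function.comp_apply, beq_self_eq_true, if_true]
      rw [if_pos (by omega), hv]
    · have hbe : ((i : Int) == (k : Int)) = false := by
        simp only [beq_eq_false_iff_ne, ne_eq, Nat.cast_inj]
        exact hik
      simp only [Function.comp_apply, hbe, Bool.false_eq_true, if_false]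
      by_cases hilt : i < k
      · rw [if_pos hilt, if_pos (by omega)]
      · rw [if_neg hilt, if_neg (by omega)]
  · have hmx : pvMx p ≤ k := by omega
    have hc : (pvMid p line k).contains (k : Int) = false := by
      rw [pvContains_mid]; simp; omega
    rw [PySem.Dict.getD_of_not_contains _ _ hc]
    have hold : pvBCol p (k : Int) = PySem.Dict.empty := pvBCol_of_ge p k hmx
    apply PySem.Dict.ext
    rw [PySem.Dict.items_insert_of_not_contains _ _ hc]
    simp only [pvMid]
    have h1 : max (pvMx p) k = k := by omega
    have h2 : max (pvMx p) (k + 1) = k + 1 := by omega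
    rw [h1, h2, List.range_succ, List.map_append]
    congr 1
    · apply List.map_congr_left
      intro i hi
      rw [List.mem_range] at hi
      rw [if_pos hi, if_pos (by omega)]
    · simp only [List.map_cons, List.map_nil]
      rw [if_pos (by omega), hv, hold]

lemma pvMid_zero (p : List String) (line : String) : pvMid p line 0 = pvState p := by
  simp [pvMid, pvState]

lemma pvMid_last (p : List String) (line : String) :
    pvMid p line line.toList.length = pvState (p ++ [line]) := by
  unfold pvMid pvState
  rw [pvMx_append p line]
  apply PySem.Dict.ext
  simp only []
  apply List.map_congr_left
  intro i hi
  by_cases hil : i < line.toList.length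
  · rw [if_pos hil]
  · rw [if_neg hil, pvBCol_append, if_neg]
    rw [PySem.Str.len_eq]
    simp only [not_lt]
    exact_mod_cast Nat.le_of_not_lt hil

lemma pvInner (p : List String) (line : String) : ∀ k, k ≤ line.toList.length →
    (List.range k).foldl (fun c (j : Nat) => pvG line c (j : Int)) (pvState p) = pvMid p line k := by
  intro k
  induction k with
  | zero => intro _; rw [List.range_zero, List.foldl_nil, pvMid_zero]
  | succ k ih =>
    intro hk
    rw [List.range_succ, List.foldl_append, ih (by omega), List.foldl_cons, List.foldl_nil,
      pvG_mid p line k (by omega)]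

lemma pvAStep_state (p : List String) (line : String) :
    pvAStep (pvState p) line = pvState (p ++ [line]) := by
  unfold pvAStep
  rw [PySem.Str.len_eq, PySem.List.pyRange_zero_natCast, List.foldl_map]
  have : (List.range line.toList.length).foldl
      (fun c (j : Nat) => pvG line c (j : Int)) (pvState p) = pvMid p line line.toList.length :=
    pvInner p line line.toList.length (le_refl _)
  rw [← pvMid_last p line]
  exact this

lemma pvFoldl_state (ls : List String) : ∀ p : List String,
    ls.foldl pvAStep (pvState p) = pvState (p ++ ls) := by
  induction ls with
  | nil => intro p; simp
  | cons l t ih =>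
    intro p
    rw [List.foldl_cons, pvAStep_state, ih (p ++ [l])]
    congr 1
    simp

lemma pvFoldlMax_cast (t : List String) : ∀ a : Nat,
    (t.map (fun l => PySem.Str.len l)).foldl max (a : Int) =
      ((t.foldl (fun acc l => max acc l.toList.length) a : Nat) : Int) := by
  induction t with
  | nil => intro a; simp
  | cons v t ih =>
    intro a
    rw [List.map_cons, List.foldl_cons, List.foldl_cons, PySem.Str.len_eq, ← Nat.cast_max, ih]

lemma pvMaxD_eq (values : List String) :
    PySem.List.maxD (values.map (fun l => PySem.Str.len l)) (fun x => x) 0 = (pvMx values : Int) := by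
  cases values with
  | nil => simp [PySem.List.maxD, pvMx, PySem.List.max?]
  | cons v t =>
    unfold PySem.List.maxD
    rw [List.map_cons, PySem.List.max?_id_cons]
    simp only [Option.getD_some]
    rw [PySem.Str.len_eq, pvFoldlMax_cast t v.toList.length]
    unfold pvMx
    rw [List.foldl_cons]
    norm_num

theorem count_bits_by_pos_spec : Claim_equal_count_bits_by_pos := by
  intro values _
  unfold Spec_count_bits_by_pos
  have hA : values.foldl pvAStep PySem.Dict.empty = pvState values := by
    have h0 : pvState [] = PySem.Dict.empty := by simp [pvState, pvMx, PySem.Dict.empty]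
    rw [← h0, pvFoldl_state values, List.nil_append]
  have hB : count_bits_by_pos_alt values =
      (List.range (pvMx values)).map (fun (k : Nat) => ((k : Int), (pvBCol values (k : Int)).items)) := by
    simp only [count_bits_by_pos_alt]
    rw [pvMaxD_eq, PySem.List.pyRange_zero_natCast, List.map_map]
    rfl
  rw [hB]
  unfold count_bits_by_pos
  rw [hA]
  simp [pvState, List.map_map, Function.comp]
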